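-- pv_equiv track=rewrite | github.com/teilomillet/textpolicy | scripts/visualize_sepa.py | _find_gram_spans
-- ===== SOURCE A (Python) =====
-- from typing import Any, Dict, List, Optional, Sequence, Tuple
--
-- def _find_gram_spans(text: str, grams: Sequence[str]) -> List[Tuple[int, int, str]]:
--     text_l = text.lower()
--     spans: List[Tuple[int, int, str]] = []
--     for gram in grams:
--         gram_l = gram.strip().lower()
--         if not gram_l:
--             continue
--         start = 0
--         while True:
--             idx = text_l.find(gram_l, start)
--             if idx < 0:
--                 break
--             end = idx + len(gram_l)
--             left_ok = idx == 0 or not text_l[idx - 1].isalnum()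
--             right_ok = end >= len(text_l) or not text_l[end].isalnum()
--             if left_ok and right_ok:
--                 spans.append((idx, end, gram))
--             start = idx + 1
--     return spans
-- ===== SOURCE B (Python) =====
-- from typing import List, Sequence, Tuple
--
-- def _find_gram_spans(text: str, grams: Sequence[str]) -> List[Tuple[int, int, str]]:
--     text_l = text.lower()
--     n = len(text_l)
--     # word-start candidate positions, computed once and shared by all grams
--     starts = [i for i in range(n) if i == 0 or not text_l[i - 1].isalnum()]
--     spans: List[Tuple[int, int, str]] = []
--     for gram in grams:
--         gram_l = gram.strip().lower()
--         if not gram_l: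
--             continue
--         m = len(gram_l)
--         spans.extend(
--             (i, i + m, gram)
--             for i in starts
--             if text_l[i:i + m] == gram_l
--             and (i + m >= n or not text_l[i + m].isalnum())
--         )
--     return spans
-- ===== Notes on version B (the rewrite author's own statement) =====
-- stated objective: faster
-- what changed: B replaces A's per-gram repeated str.find-with-restart scan by a word-start position index computed once from the text and shared by all grams: each gram is tested only at those boundary positions via slice comparison, so A's re-scan of the text from every occurrence disappears.
import Mathlib
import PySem

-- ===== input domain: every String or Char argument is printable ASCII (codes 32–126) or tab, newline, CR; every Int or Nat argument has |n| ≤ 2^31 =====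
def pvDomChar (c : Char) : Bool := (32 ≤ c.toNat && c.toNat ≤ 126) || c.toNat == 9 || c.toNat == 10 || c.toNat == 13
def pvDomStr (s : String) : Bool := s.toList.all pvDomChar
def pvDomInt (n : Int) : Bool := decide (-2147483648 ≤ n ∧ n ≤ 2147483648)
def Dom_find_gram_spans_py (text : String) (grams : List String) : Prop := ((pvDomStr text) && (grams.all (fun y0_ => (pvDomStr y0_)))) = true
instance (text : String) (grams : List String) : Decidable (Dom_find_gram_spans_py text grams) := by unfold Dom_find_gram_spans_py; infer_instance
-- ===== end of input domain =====

-- B replaces A's per-gram find-with-restart scan by a word-start index built once from the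
-- text and shared by all grams (alternative decomposition; equal return value proved below).

-- ===== PORT A =====
-- A's inner `while True` loop: `start` only ever moves to `idx+1 > start` and a successful
-- find satisfies idx < len(text), so `tl.length + 1 - start` bounds the iteration count; the
-- fuel argument is initialised to `tl.length + 1` and is never exhausted before `find` fails.
-- `tl.getD (i-1) ' '` / `tl.getD e ' '` port `text_l[idx-1]` / `text_l[end]`: both accesses
-- are guarded exactly as Python's `or` short-circuits them, so the default is never read.
def aLoop (tl gl : List Char) (gram : String) : Nat → Nat → List (Int × Int × String) → List (Int × Int × String)
  | 0, _, spans => spans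
  | fuel+1, start, spans =>
    let idx := PySem.Chars.findFrom tl gl (start : Int)
    if idx < 0 then spans
    else
      let i := idx.toNat
      let e := i + gl.length
      let left_ok := i == 0 || !PySem.Chars.isalnum (tl.getD (i-1) ' ')
      let right_ok := decide (tl.length ≤ e) || !PySem.Chars.isalnum (tl.getD e ' ')
      aLoop tl gl gram fuel (i+1)
        (if left_ok && right_ok then spans ++ [((i : Int), (e : Int), gram)] else spans)

def find_gram_spans_py (text : String) (grams : List String) : List (Int × Int × String) :=
  let tl := (PySem.Str.lower text).toList
  grams.foldl (fun spans gram =>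
    let gl := PySem.Chars.lower (PySem.Chars.strip gram.toList)
    if gl = [] then spans
    else aLoop tl gl gram (tl.length + 1) 0 spans) []

-- ===== PORT B =====
-- `starts = [i for i in range(n) if i == 0 or not text_l[i-1].isalnum()]`
def bStarts (tl : List Char) : List Int :=
  (PySem.List.pyRange 0 (tl.length : Int)).filter
    (fun i => i == 0 || !PySem.Chars.isalnum (PySem.List.pyGetD tl (i - 1) ' '))

-- the generator expression: matches of one gram over the shared word-start index
def bMatches (tl : List Char) (starts : List Int) (gl : List Char) (gram : String) : List (Int × Int × String) :=
  (starts.filter (fun i =>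
      (PySem.List.slice tl (some i) (some (i + (gl.length : Int))) == gl) &&
      (decide ((tl.length : Int) ≤ i + (gl.length : Int)) ||
        !PySem.Chars.isalnum (PySem.List.pyGetD tl (i + (gl.length : Int)) ' ')))).map
    (fun i => (i, i + (gl.length : Int), gram))

def find_gram_spans_py_alt (text : String) (grams : List String) : List (Int × Int × String) :=
  let tl := (PySem.Str.lower text).toList
  let starts := bStarts tl
  grams.foldl (fun spans gram =>
    let gl := PySem.Chars.lower (PySem.Chars.strip gram.toList)
    if gl = [] then spans
    else spans ++ bMatches tl starts gl gram) []

-- ===== PRECONDITION & SPEC =====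
def Spec_find_gram_spans_py (text : String) (grams : List String) (out : List (Int × Int × String)) : Prop := out = find_gram_spans_py_alt text grams
instance (text : String) (grams : List String) (out : List (Int × Int × String)) : Decidable (Spec_find_gram_spans_py text grams out) := by unfold Spec_find_gram_spans_py; infer_instance

-- ===== CLAIM (what is proved, stated in full; the proofs are below) =====
def Claim_equal_find_gram_spans_py : Prop := ∀ (text : String) (grams : List String), Dom_find_gram_spans_py text grams → Spec_find_gram_spans_py text grams (find_gram_spans_py text grams)

-- ===== LEMMAS AND PROOFS =====

-- the match predicate both programs compute at position i: occurrence + word boundaries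
def pvP (tl gl : List Char) (i : Nat) : Bool :=
  gl.isPrefixOf (tl.drop i) &&
  ((i == 0 || !PySem.Chars.isalnum (tl.getD (i - 1) ' ')) &&
   (decide (tl.length ≤ i + gl.length) || !PySem.Chars.isalnum (tl.getD (i + gl.length) ' ')))

def pvSpan (gl : List Char) (gram : String) (i : Nat) : Int × Int × String :=
  ((i : Int), ((i + gl.length : Nat) : Int), gram)

theorem pvP_false_of_min (tl gl : List Char) {s i : Nat} (hsi : s ≤ i)
    (h : ¬ gl <:+: tl.drop s) : pvP tl gl i = false := by
  unfold pvP
  have : ¬ gl <+: tl.drop i := by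
    intro hp
    apply h
    have hd : tl.drop i = (tl.drop s).drop (i - s) := by
      rw [List.drop_drop]; congr 1; omega
    exact (hp.isInfix).trans (hd ▸ (List.drop_suffix (i - s) (tl.drop s)).isInfix)
  simp [List.isPrefixOf_iff_prefix, this]

theorem aLoop_eq (tl gl : List Char) (gram : String) (hgl : gl ≠ []) :
    ∀ (fuel s : Nat) (spans : List (Int × Int × String)),
    s ≤ tl.length → tl.length + 1 - s ≤ fuel →
    aLoop tl gl gram fuel s spans =
      spans ++ ((List.range' s (tl.length - s)).filter (pvP tl gl)).map (pvSpan gl gram) := by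
  intro fuel
  induction fuel with
  | zero => intro s spans hs hf; omega
  | succ fuel ih =>
    intro s spans hs hf
    rw [aLoop]
    by_cases hneg : PySem.Chars.findFrom tl gl (s : Int) < 0
    · -- not found: no occurrence at or after s
      have hm1 : PySem.Chars.findFrom tl gl (s : Int) = -1 := by
        by_contra hne
        have := (PySem.Chars.findFrom_natCast_spec tl gl s hs hne).1
        omega
      have hno : ¬ gl <:+: tl.drop s :=
        (PySem.Chars.findFrom_natCast_eq_neg_one_iff tl gl s hs).mp hm1
      rw [if_pos hneg]
      have : (List.range' s (tl.length - s)).filter (pvP tl gl) = [] := by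
        apply List.filter_eq_nil_iff.mpr
        intro i hi
        have hmem := List.mem_range'_1.mp hi
        simp [pvP_false_of_min tl gl hmem.1 hno]
      simp [this]
    · rw [if_neg hneg]
      have hne : PySem.Chars.findFrom tl gl (s : Int) ≠ -1 := by omega
      obtain ⟨hle, hpre, hmin⟩ := PySem.Chars.findFrom_natCast_spec tl gl s hs hne
      set t := (PySem.Chars.findFrom tl gl (s : Int)).toNat with ht
      have hst : s ≤ t := by omega
      have htlen : t < tl.length := by
        by_contra hge
        have : tl.drop t = [] := List.drop_eq_nil_of_le (by omega)
        rw [this] at hpre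
        exact hgl (List.prefix_nil.mp hpre)
      -- split the range at t
      have hsplit : List.range' s (tl.length - s) =
          List.range' s (t - s) ++ t :: List.range' (t+1) (tl.length - (t+1)) := by
        have h1 : List.range' s (t - s) ++ List.range' (s + 1 * (t - s)) ((tl.length - s) - (t - s)) =
            List.range' s ((t - s) + ((tl.length - s) - (t - s))) := List.range'_append
        have h2 : s + 1 * (t - s) = t := by omega
        have h3 : (t - s) + ((tl.length - s) - (t - s)) = tl.length - s := by omega
        have h4 : (tl.length - s) - (t - s) = (tl.length - (t+1)) + 1 := by omega
        rw [h2, h3, h4] at h1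
        rw [← h1, List.range'_succ]
      have hskip : (List.range' s (t - s)).filter (pvP tl gl) = [] := by
        apply List.filter_eq_nil_iff.mpr
        intro i hi
        have hmem := List.mem_range'_1.mp hi
        unfold pvP
        have : ¬ gl <+: tl.drop i := hmin i hmem.1 (by omega)
        simp [List.isPrefixOf_iff_prefix, this]
      have hPt : pvP tl gl t =
          ((t == 0 || !PySem.Chars.isalnum (tl.getD (t - 1) ' ')) &&
           (decide (tl.length ≤ t + gl.length) || !PySem.Chars.isalnum (tl.getD (t + gl.length) ' '))) := by
        unfold pvP
        simp [List.isPrefixOf_iff_prefix, hpre]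
      rw [ih (t+1) _ (by omega) (by omega), hsplit]
      rw [List.filter_append, hskip, List.nil_append, List.filter_cons, hPt]
      by_cases hc : ((t == 0 || !PySem.Chars.isalnum (tl.getD (t - 1) ' ')) &&
           (decide (tl.length ≤ t + gl.length) || !PySem.Chars.isalnum (tl.getD (t + gl.length) ' '))) = true
      · rw [if_pos hc, if_pos hc]
        simp only [List.map_cons, List.append_assoc, List.cons_append, List.nil_append]
        rfl
      · rw [if_neg hc, if_neg hc]

theorem bMatches_eq (tl gl : List Char) (gram : String) :
    bMatches tl (bStarts tl) gl gram =
      ((List.range tl.length).filter (pvP tl gl)).map (pvSpan gl gram) := by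
  unfold bMatches bStarts
  rw [PySem.List.pyRange_zero_natCast, List.filter_map, List.filter_map, List.filter_filter,
      List.map_map]
  have hfe : ∀ i ∈ List.range tl.length,
      (((fun i => (PySem.List.slice tl (some i) (some (i + (gl.length : Int))) == gl) &&
          (decide ((tl.length : Int) ≤ i + (gl.length : Int)) ||
            !PySem.Chars.isalnum (PySem.List.pyGetD tl (i + (gl.length : Int)) ' '))) ∘ (fun k : Nat => (k : Int))) i &&
        ((fun i : Int => i == 0 || !PySem.Chars.isalnum (PySem.List.pyGetD tl (i - 1) ' ')) ∘ (fun k : Nat => (k : Int))) i)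
        = pvP tl gl i := by
    intro k _
    simp only [Function.comp]
    have hslice : PySem.List.slice tl (some (k : Int)) (some ((k : Int) + (gl.length : Int))) =
        (tl.drop k).take gl.length := PySem.List.slice_natCast_add tl k gl.length
    have hocc : (PySem.List.slice tl (some (k : Int)) (some ((k : Int) + (gl.length : Int))) == gl)
        = gl.isPrefixOf (tl.drop k) := by
      rw [hslice, Bool.eq_iff_iff]
      simp only [beq_iff_eq, List.isPrefixOf_iff_prefix]
      constructor
      · intro h; exact List.prefix_iff_eq_take.mpr h.symm
      · intro h; exact (List.prefix_iff_eq_take.mp h).symm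
    have hright : (decide ((tl.length : Int) ≤ (k : Int) + (gl.length : Int)) ||
          !PySem.Chars.isalnum (PySem.List.pyGetD tl ((k : Int) + (gl.length : Int)) ' '))
        = (decide (tl.length ≤ k + gl.length) || !PySem.Chars.isalnum (tl.getD (k + gl.length) ' ')) := by
      have h1 : (k : Int) + (gl.length : Int) = ((k + gl.length : Nat) : Int) := by push_cast; ring
      rw [h1, PySem.List.pyGetD_natCast]
      congr 1
      simp only [decide_eq_decide]
      exact_mod_cast Iff.rfl
    have hleft : ((k : Int) == 0 || !PySem.Chars.isalnum (PySem.List.pyGetD tl ((k : Int) - 1) ' '))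
        = (k == 0 || !PySem.Chars.isalnum (tl.getD (k - 1) ' ')) := by
      by_cases hk : k = 0
      · subst hk; simp
      · have h0 : ((k : Int) == 0) = false := by simp; omega
        have h0' : (k == 0) = false := by simp [hk]
        have h1 : (k : Int) - 1 = ((k - 1 : Nat) : Int) := by omega
        rw [h0, h0', h1, PySem.List.pyGetD_natCast]
    rw [hocc, hright, hleft]
    unfold pvP
    cases hA : gl.isPrefixOf (tl.drop k) <;>
      cases hB : (k == 0 || !PySem.Chars.isalnum (tl.getD (k - 1) ' ')) <;>
        cases hC : (decide (tl.length ≤ k + gl.length) || !PySem.Chars.isalnum (tl.getD (k + gl.length) ' ')) <;>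
          decide
  rw [List.filter_congr hfe]
  apply List.map_congr_left
  intro k hk
  have := (List.mem_filter.mp hk).1
  simp only [Function.comp, pvSpan]
  push_cast; rfl

theorem perGram_eq (tl gl : List Char) (gram : String) (hgl : gl ≠ []) :
    aLoop tl gl gram (tl.length + 1) 0 [] = bMatches tl (bStarts tl) gl gram := by
  rw [aLoop_eq tl gl gram hgl (tl.length + 1) 0 [] (Nat.zero_le _) (by omega),
      bMatches_eq, List.nil_append, List.range_eq_range', Nat.sub_zero]

theorem aLoop_acc (tl gl : List Char) (gram : String) (hgl : gl ≠ []) (spans : List (Int × Int × String)) :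
    aLoop tl gl gram (tl.length + 1) 0 spans = spans ++ aLoop tl gl gram (tl.length + 1) 0 [] := by
  rw [aLoop_eq tl gl gram hgl (tl.length + 1) 0 spans (Nat.zero_le _) (by omega),
      aLoop_eq tl gl gram hgl (tl.length + 1) 0 [] (Nat.zero_le _) (by omega),
      List.nil_append]

-- ===== VERDICT (by name: the statement is the Claim_ definition above) =====
theorem find_gram_spans_py_spec : Claim_equal_find_gram_spans_py := by
  intro text grams _
  unfold Spec_find_gram_spans_py find_gram_spans_py find_gram_spans_py_alt
  apply PySem.List.foldl_congr_mem
  intro spans gram _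
  by_cases h : PySem.Chars.lower (PySem.Chars.strip gram.toList) = []
  · simp [h]
  · simp only [if_neg h]
    rw [aLoop_acc _ _ _ h, perGram_eq _ _ _ h]
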